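-- pv_equiv track=rewrite | github.com/mitdbg/carnot | src/carnot/core/data/auto_retrieval/_internal/propagate.py | _ancestor_subjects
-- ===== SOURCE A (Python) =====
-- from collections import deque
-- from typing import Any, Dict, Iterable, List, Set, Tuple
--
-- def _ancestor_subjects(subject: str, edges: Dict[str, Set[str]]) -> Set[str]:
--     if subject not in edges:
--         return set()
--     seen: Set[str] = set()
--     queue: deque[str] = deque([subject])
--     while queue:
--         cur = queue.popleft()
--         for parent in edges.get(cur, set()):
--             if parent in seen:
--                 continue
--             seen.add(parent)
--             queue.append(parent)
--     return seen
-- ===== SOURCE B (Python) =====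
-- def _ancestor_subjects(subject, edges):
--     # Naive fixpoint (Kleene) iteration instead of a graph search: no queue, no
--     # per-node visited test -- start from the direct parents and repeatedly union
--     # in the parents of everything known until the set stops growing.
--     if subject not in edges:
--         return set()
--     seen = set(edges[subject])
--     while True:
--         grown = seen.union(*(edges.get(n, set()) for n in seen))
--         if grown == seen:
--             return seen
--         seen = grown
-- ===== Notes on version B (the rewrite author's own statement) =====
-- stated objective: alternative
-- what changed: Replaces the deque BFS with visited-set bookkeeping by naive fixpoint (Kleene) iteration: start from the subject's direct parents and repeatedly take the union of the parents of every known node until the set stops growing; no queue and no per-node membership test.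
import Mathlib
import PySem

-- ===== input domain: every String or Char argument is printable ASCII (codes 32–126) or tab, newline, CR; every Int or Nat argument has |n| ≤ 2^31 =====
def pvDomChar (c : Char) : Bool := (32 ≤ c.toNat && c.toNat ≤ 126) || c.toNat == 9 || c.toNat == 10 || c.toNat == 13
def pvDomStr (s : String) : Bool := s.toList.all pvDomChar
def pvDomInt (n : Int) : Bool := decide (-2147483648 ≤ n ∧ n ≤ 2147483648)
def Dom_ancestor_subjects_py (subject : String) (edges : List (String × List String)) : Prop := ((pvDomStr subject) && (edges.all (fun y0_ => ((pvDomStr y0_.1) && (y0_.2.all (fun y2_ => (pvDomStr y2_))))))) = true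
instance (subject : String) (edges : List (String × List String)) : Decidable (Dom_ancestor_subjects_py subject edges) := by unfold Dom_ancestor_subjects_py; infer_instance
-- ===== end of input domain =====

-- B replaces A's deque BFS (queue + per-node visited test) by naive fixpoint (Kleene)
-- iteration: union in the parents of every known node until the set stops growing;
-- alternative decomposition, not claimed faster. Both return the same SET; the ports
-- realise it in the same (A's discovery) order, which the proof establishes.
-- Fuel counters are totality guards only; the proof shows they never run out.

-- ===== PORT A =====
-- `edges.get(cur, set())` / `edges[subject]` (dict lookup; the [] default is unreachable
-- for `edges[subject]`, which B only evaluates under the `subject in edges` guard)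
def pvParents (edges : List (String × List String)) (cur : String) : List String :=
  PySem.Dict.getD (PySem.Dict.mk edges) cur []

-- `if parent in seen: continue; seen.add(parent); queue.append(parent)`
def pvAddParent (sq : List String × List String) (p : String) : List String × List String :=
  if PySem.Set.contains sq.1 p then sq else (PySem.Set.add sq.1 p, sq.2 ++ [p])

-- A: while queue: cur = queue.popleft(); for parent in edges.get(cur, set()): …
def pvLoopA (edges : List (String × List String)) : Nat → List String → List String → List String
  | _, seen, [] => seen
  | 0, seen, _ :: _ => seen
  | fuel + 1, seen, cur :: queue =>
      let sq := (pvParents edges cur).foldl pvAddParent (seen, queue)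
      pvLoopA edges fuel sq.1 sq.2

def ancestor_subjects_py (subject : String) (edges : List (String × List String)) : List String :=
  if PySem.Dict.contains (PySem.Dict.mk edges) subject then
    pvLoopA edges ((edges.map (fun kv => kv.2.length)).sum + 1) PySem.Set.empty [subject]
  else PySem.Set.empty

-- ===== PORT B =====
-- `grown = seen.union(*(edges.get(n, set()) for n in seen))`
def pvGrow (edges : List (String × List String)) (seen : List String) : List String :=
  seen.foldl (fun g n => PySem.Set.union g (pvParents edges n)) seen

-- B: while True: grown = …; if grown == seen: return seen; seen = grown
def pvLoopBB (edges : List (String × List String)) : Nat → List String → List String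
  | 0, seen => seen
  | fuel + 1, seen =>
      let grown := pvGrow edges seen
      if PySem.Set.equal grown seen then seen else pvLoopBB edges fuel grown

def ancestor_subjects_py_alt (subject : String) (edges : List (String × List String)) : List String :=
  if PySem.Dict.contains (PySem.Dict.mk edges) subject then
    pvLoopBB edges ((edges.map (fun kv => kv.2.length)).sum + 1)
      (PySem.Set.ofList (pvParents edges subject))
  else PySem.Set.empty

-- ===== PRECONDITION & SPEC =====
def Spec_ancestor_subjects_py (subject : String) (edges : List (String × List String)) (out : List String) : Prop := out = ancestor_subjects_py_alt subject edges
instance (subject : String) (edges : List (String × List String)) (out : List String) : Decidable (Spec_ancestor_subjects_py subject edges out) := by unfold Spec_ancestor_subjects_py; infer_instance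

-- ===== CLAIM (what is proved, stated in full; the proofs are below) =====
def Claim_equal_ancestor_subjects_py : Prop := ∀ (subject : String) (edges : List (String × List String)), Dom_ancestor_subjects_py subject edges → Spec_ancestor_subjects_py subject edges (ancestor_subjects_py subject edges)

-- ===== LEMMAS AND PROOFS =====

-- proof-side intermediate: level-synchronous BFS, the bridge between A's queue and B's fixpoint
def pvLevelB (edges : List (String × List String)) (sn : List String × List String)
    (frontier : List String) : List String × List String :=
  frontier.foldl (fun sn cur => (pvParents edges cur).foldl pvAddParent sn) sn

def pvLoopB (edges : List (String × List String)) : Nat → List String → List String → List String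
  | _, seen, [] => seen
  | 0, seen, _ :: _ => seen
  | fuel + 1, seen, c :: fr =>
      let sn := pvLevelB edges (seen, []) (c :: fr)
      pvLoopB edges fuel sn.1 sn.2

-- the universe of everything ever enqueued past the start: all parent lists flattened
def pvU (edges : List (String × List String)) : List String :=
  edges.flatMap (fun kv => kv.2)

lemma pvParents_subset (edges : List (String × List String)) (cur : String) :
    pvParents edges cur ⊆ pvU edges := by
  induction edges with
  | nil =>
      intro x hx
      simp [pvParents, PySem.Dict.getD_eq_get?_getD, PySem.Dict.get?] at hx
  | cons kv rest ih =>
      intro x hx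
      rw [show kv = (kv.1, kv.2) from rfl,
        show pvParents ((kv.1, kv.2) :: rest) cur
          = if kv.1 == cur then kv.2 else pvParents rest cur by
            rw [pvParents, PySem.Dict.getD_eq_get?_getD, PySem.Dict.get?_mk_cons]
            split
            · rfl
            · rw [pvParents, PySem.Dict.getD_eq_get?_getD]] at hx
      simp only [pvU, List.flatMap_cons, List.mem_append]
      by_cases h : kv.1 == cur
      · exact Or.inl (by simpa [h] using hx)
      · exact Or.inr (ih (by simpa [h] using hx))

-- the inner fold only appends to the queue component; the seen component ignores the queue
lemma pvFold_split (ps : List String) (s q r : List String) :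
    ps.foldl pvAddParent (s, q ++ r) =
      ((ps.foldl pvAddParent (s, r)).1, q ++ (ps.foldl pvAddParent (s, r)).2) := by
  induction ps generalizing s r with
  | nil => rfl
  | cons p ps ih =>
      simp only [List.foldl_cons, pvAddParent]
      by_cases hm : p ∈ s
      · simp only [PySem.Set.contains_eq_listContains]
        simp [hm, ih]
      · simp only [PySem.Set.contains_eq_listContains]
        simp only [List.contains_eq_mem, hm, decide_false, Bool.false_eq_true, if_false]
        rw [List.append_assoc]
        exact ih _ _

-- every new element goes to seen and to the queue alike
lemma pvFold_len (ps : List String) (s q : List String) :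
    (ps.foldl pvAddParent (s, q)).1.length + q.length =
      (ps.foldl pvAddParent (s, q)).2.length + s.length := by
  induction ps generalizing s q with
  | nil => simp [Nat.add_comm]
  | cons p ps ih =>
      simp only [List.foldl_cons, pvAddParent, PySem.Set.contains_eq_listContains]
      by_cases hm : p ∈ s
      · simp [hm, ih]
      · simp only [List.contains_eq_mem, hm, decide_false, Bool.false_eq_true, if_false]
        rw [PySem.Set.add_of_not_mem hm]
        have := ih (s ++ [p]) (q ++ [p])
        simp only [List.length_append, List.length_cons, List.length_nil] at this ⊢
        omega

lemma pvFold_inv (ps : List String) (s q : List String) (U : List String)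
    (hnd : s.Nodup) (hsub : s ⊆ U) (hps : ps ⊆ U) :
    (ps.foldl pvAddParent (s, q)).1.Nodup ∧ (ps.foldl pvAddParent (s, q)).1 ⊆ U := by
  induction ps generalizing s q with
  | nil => exact ⟨hnd, hsub⟩
  | cons p ps ih =>
      have hpU : p ∈ U := hps (List.mem_cons_self ..)
      have hps' : ps ⊆ U := fun x hx => hps (List.mem_cons_of_mem _ hx)
      simp only [List.foldl_cons, pvAddParent, PySem.Set.contains_eq_listContains]
      by_cases hm : p ∈ s
      · simp only [List.contains_eq_mem, hm, decide_true, if_true]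
        exact ih s q hnd hsub hps'
      · simp only [List.contains_eq_mem, hm, decide_false, Bool.false_eq_true, if_false]
        rw [PySem.Set.add_of_not_mem hm]
        refine ih _ _ ?_ ?_ hps'
        · simp [List.nodup_append, hnd]
          exact fun a ha he => hm (he ▸ ha)
        · intro x hx
          rcases List.mem_append.1 hx with hx | hx
          · exact hsub hx
          · simp at hx; subst hx; exact hpU

-- the seen component of the inner fold is exactly a set-update, independent of the queue
lemma pvFold_fst (ps : List String) (s q : List String) :
    (ps.foldl pvAddParent (s, q)).1 = PySem.Set.update s ps := by
  induction ps generalizing s q with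
  | nil => rfl
  | cons p ps ih =>
      simp only [List.foldl_cons, pvAddParent, PySem.Set.contains_eq_listContains,
        PySem.Set.update_cons]
      by_cases hm : p ∈ s
      · simp only [List.contains_eq_mem, hm, decide_true, if_true,
          PySem.Set.add_of_mem hm]
        exact ih s q
      · simp only [List.contains_eq_mem, hm, decide_false, Bool.false_eq_true, if_false]
        exact ih _ _

-- every step appends the SAME fresh element to seen and queue alike
lemma pvFold_delta (ps : List String) (s q : List String) :
    ∃ d, ps.foldl pvAddParent (s, q) = (s ++ d, q ++ d) := by
  induction ps generalizing s q with
  | nil => exact ⟨[], by simp⟩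
  | cons p ps ih =>
      simp only [List.foldl_cons, pvAddParent, PySem.Set.contains_eq_listContains]
      by_cases hm : p ∈ s
      · simp only [List.contains_eq_mem, hm, decide_true, if_true]
        exact ih s q
      · simp only [List.contains_eq_mem, hm, decide_false, Bool.false_eq_true, if_false]
        rw [PySem.Set.add_of_not_mem hm]
        obtain ⟨d, hd⟩ := ih (s ++ [p]) (q ++ [p])
        exact ⟨p :: d, by simp [hd]⟩

lemma pvLevel_delta (edges : List (String × List String)) (fr : List String)
    (s q : List String) :
    ∃ d, pvLevelB edges (s, q) fr = (s ++ d, q ++ d) := by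
  induction fr generalizing s q with
  | nil => exact ⟨[], by simp [pvLevelB]⟩
  | cons c fr ih =>
      obtain ⟨d1, hd1⟩ := pvFold_delta (pvParents edges c) s q
      obtain ⟨d2, hd2⟩ := ih (s ++ d1) (q ++ d1)
      refine ⟨d1 ++ d2, ?_⟩
      show pvLevelB edges ((pvParents edges c).foldl pvAddParent (s, q)) fr = _
      rw [hd1, hd2]
      simp [List.append_assoc]

-- the seen component of a level round is a fold of set-updates (queue-independent)
lemma pvLevel_fst (edges : List (String × List String)) (fr : List String)
    (s q : List String) :
    (pvLevelB edges (s, q) fr).1 =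
      fr.foldl (fun g c => PySem.Set.update g (pvParents edges c)) s := by
  induction fr generalizing s q with
  | nil => rfl
  | cons c fr ih =>
      show (pvLevelB edges ((pvParents edges c).foldl pvAddParent (s, q)) fr).1 = _
      obtain ⟨d, hd⟩ := pvFold_delta (pvParents edges c) s q
      rw [hd, ih, List.foldl_cons]
      congr 1
      rw [← pvFold_fst (pvParents edges c) s q, hd]

lemma pvLevel_len (edges : List (String × List String)) (fr : List String) (s q : List String) :
    (pvLevelB edges (s, q) fr).1.length + q.length =
      (pvLevelB edges (s, q) fr).2.length + s.length := by
  induction fr generalizing s q with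
  | nil => simp [pvLevelB, Nat.add_comm]
  | cons c fr ih =>
      have h1 := pvFold_len (pvParents edges c) s q
      have h2 := ih (((pvParents edges c).foldl pvAddParent (s, q)).1)
                   (((pvParents edges c).foldl pvAddParent (s, q)).2)
      simp only [Prod.mk.eta] at h2
      show (pvLevelB edges ((pvParents edges c).foldl pvAddParent (s, q)) fr).1.length + q.length =
        (pvLevelB edges ((pvParents edges c).foldl pvAddParent (s, q)) fr).2.length + s.length
      omega

lemma pvLevel_inv (edges : List (String × List String)) (fr : List String) (s q : List String)
    (hnd : s.Nodup) (hsub : s ⊆ pvU edges) :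
    (pvLevelB edges (s, q) fr).1.Nodup ∧ (pvLevelB edges (s, q) fr).1 ⊆ pvU edges := by
  induction fr generalizing s q with
  | nil => exact ⟨hnd, hsub⟩
  | cons c fr ih =>
      obtain ⟨h1, h2⟩ := pvFold_inv (pvParents edges c) s q (pvU edges) hnd hsub
        (pvParents_subset edges c)
      exact ih (((pvParents edges c).foldl pvAddParent (s, q)).1)
               (((pvParents edges c).foldl pvAddParent (s, q)).2) h1 h2

-- after a level round, every processed node's parents are all in the seen component
lemma pvLevel_closure (edges : List (String × List String)) (fr : List String)
    (s q : List String) :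
    ∀ x ∈ fr, ∀ y ∈ pvParents edges x, y ∈ (pvLevelB edges (s, q) fr).1 := by
  induction fr generalizing s q with
  | nil => intro x hx; cases hx
  | cons c fr ih =>
      intro x hx y hy
      show y ∈ (pvLevelB edges ((pvParents edges c).foldl pvAddParent (s, q)) fr).1
      obtain ⟨d1, hd1⟩ := pvFold_delta (pvParents edges c) s q
      rcases List.mem_cons.1 hx with heq | hx
      · -- x = c: y already in the intermediate seen, which only grows
        rw [heq] at hy
        have hy1 : y ∈ ((pvParents edges c).foldl pvAddParent (s, q)).1 := by
          rw [pvFold_fst]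
          exact (PySem.Set.mem_update _ _ _).2 (Or.inr hy)
        rw [hd1] at hy1 ⊢
        obtain ⟨d2, hd2⟩ := pvLevel_delta edges fr (s ++ d1) (q ++ d1)
        rw [hd2]
        exact List.mem_append_left _ hy1
      · rw [hd1]
        exact ih (s ++ d1) (q ++ d1) x hx y hy

lemma pvUpdate_of_subset (s ps : List String) (h : ∀ y ∈ ps, y ∈ s) :
    PySem.Set.update s ps = s := by
  induction ps with
  | nil => rfl
  | cons p ps ih =>
      rw [PySem.Set.update_cons, PySem.Set.add_of_mem (h p (List.mem_cons_self ..))]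
      exact ih (fun y hy => h y (List.mem_cons_of_mem _ hy))

-- folding updates over nodes whose parents are already all in the accumulator changes nothing
lemma pvFoldUpdate_fixed (edges : List (String × List String)) (p s : List String)
    (h : ∀ x ∈ p, ∀ y ∈ pvParents edges x, y ∈ s) :
    p.foldl (fun g n => PySem.Set.update g (pvParents edges n)) s = s := by
  induction p with
  | nil => rfl
  | cons x p ih =>
      rw [List.foldl_cons, pvUpdate_of_subset _ _ (h x (List.mem_cons_self ..))]
      exact ih (fun x' hx' => h x' (List.mem_cons_of_mem _ hx'))

-- B's union pass over seen = p ++ fr: the p-part (already closed) adds nothing,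
-- the fr-part is exactly one level round
lemma pvGrow_eq (edges : List (String × List String)) (p fr : List String)
    (hcl : ∀ x ∈ p, ∀ y ∈ pvParents edges x, y ∈ p ++ fr) :
    pvGrow edges (p ++ fr) = (pvLevelB edges (p ++ fr, []) fr).1 := by
  have hunion : (fun (g : List String) (n : String) => PySem.Set.union g (pvParents edges n))
      = fun g n => PySem.Set.update g (pvParents edges n) := rfl
  rw [pvGrow, hunion, List.foldl_append, pvFoldUpdate_fixed edges p (p ++ fr) hcl,
    pvLevel_fst]

lemma pvLoopA_nil (edges : List (String × List String)) (f : Nat) (s : List String) :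
    pvLoopA edges f s [] = s := by
  cases f <;> rfl

lemma pvLoopB_nil (edges : List (String × List String)) (f : Nat) (s : List String) :
    pvLoopB edges f s [] = s := by
  cases f <;> rfl

-- A processes a whole frontier exactly like one B round, consuming frontier.length fuel
lemma pvStep (edges : List (String × List String)) (front : List String) (f : Nat)
    (s acc : List String) :
    pvLoopA edges (front.length + f) s (front ++ acc) =
      pvLoopA edges f (pvLevelB edges (s, acc) front).1 (pvLevelB edges (s, acc) front).2 := by
  induction front generalizing s acc with
  | nil =>
      simp only [List.length_nil, Nat.zero_add, List.nil_append, pvLevelB, List.foldl_nil]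
  | cons c fr ih =>
      have hfuel : (c :: fr).length + f = (fr.length + f) + 1 := by
        simp [List.length_cons]; omega
      rw [hfuel]
      show pvLoopA edges (fr.length + f)
        ((pvParents edges c).foldl pvAddParent (s, fr ++ acc)).1
        ((pvParents edges c).foldl pvAddParent (s, fr ++ acc)).2 = _
      rw [pvFold_split]
      rw [ih]
      rfl

-- queue BFS = level BFS (with enough fuel on both sides)
lemma pvMain (edges : List (String × List String)) :
    ∀ (fB fA : Nat) (s front : List String), s.Nodup → s ⊆ pvU edges →
      front.length + ((pvU edges).length - s.length) ≤ fA →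
      front.length + ((pvU edges).length - s.length) ≤ fB →
      pvLoopA edges fA s front = pvLoopB edges fB s front := by
  intro fB
  induction fB with
  | zero =>
      intro fA s front _ _ _ hB
      have hfr : front = [] := by
        cases front with
        | nil => rfl
        | cons c fr => simp at hB
      subst hfr
      rw [pvLoopA_nil]; rfl
  | succ g ih =>
      intro fA s front hnd hsub hA hB
      cases front with
      | nil => rw [pvLoopA_nil]; rfl
      | cons c fr =>
          have hsl : s.length ≤ (pvU edges).length := (hnd.subperm hsub).length_le
          have hfa : fA = (c :: fr).length + (fA - (c :: fr).length) := by
            simp only [List.length_cons] at hA ⊢; omega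
          have key := pvStep edges (c :: fr) (fA - (c :: fr).length) s []
          simp only [List.append_nil] at key
          rw [hfa, key]
          have hrhs : pvLoopB edges (g + 1) s (c :: fr) =
              pvLoopB edges g (pvLevelB edges (s, []) (c :: fr)).1
                (pvLevelB edges (s, []) (c :: fr)).2 := rfl
          rw [hrhs]
          obtain ⟨h1, h2⟩ := pvLevel_inv edges (c :: fr) s [] hnd hsub
          have hlen := pvLevel_len edges (c :: fr) s []
          have hsl' : (pvLevelB edges (s, []) (c :: fr)).1.length ≤ (pvU edges).length :=
            (h1.subperm h2).length_le
          apply ih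
          · exact h1
          · exact h2
          · simp only [List.length_nil] at hlen
            simp only [List.length_cons] at hA ⊢
            omega
          · simp only [List.length_nil] at hlen
            simp only [List.length_cons] at hB ⊢
            omega

lemma pvEqual_refl (s : List String) : PySem.Set.equal s s = true := by
  simp [PySem.Set.equal_iff]

lemma pvEqual_false (s d : List String) (hne : d ≠ []) (hdis : ∀ x ∈ d, x ∉ s) :
    PySem.Set.equal (s ++ d) s = false := by
  cases d with
  | nil => exact absurd rfl hne
  | cons c d =>
      cases h : PySem.Set.equal (s ++ (c :: d)) s with
      | false => rfl
      | true =>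
          have := ((PySem.Set.equal_iff _ _).1 h c).1 (by simp)
          exact absurd this (hdis c (by simp))

-- level BFS = B's fixpoint loop (the frontier is the fresh tail of seen)
lemma pvCorr (edges : List (String × List String)) :
    ∀ (g fB : Nat) (s p fr : List String), s = p ++ fr →
      (∀ x ∈ p, ∀ y ∈ pvParents edges x, y ∈ s) →
      s.Nodup → s ⊆ pvU edges →
      (fr ≠ [] → ((pvU edges).length - s.length) + 1 ≤ fB ∧
                  ((pvU edges).length - s.length) + 1 ≤ g) →
      pvLoopB edges fB s fr = pvLoopBB edges g s := by
  intro g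
  induction g with
  | zero =>
      intro fB s p fr hs hcl hnd hsub hf
      cases fr with
      | nil => rw [pvLoopB_nil]; rfl
      | cons c fr' => exact absurd (hf (by simp)).2 (by omega)
  | succ g ih =>
      intro fB s p fr hs hcl hnd hsub hf
      subst hs
      cases fr with
      | nil =>
          rw [pvLoopB_nil]
          have hg : pvGrow edges (p ++ []) = p ++ [] := by
            rw [pvGrow_eq edges p [] hcl]
            rfl
          simp only [pvLoopBB, hg, pvEqual_refl, if_true]
      | cons c fr' =>
          obtain ⟨hfB, hfg⟩ := hf (by simp)
          cases fB with
          | zero => omega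
          | succ h =>
          have hg : pvGrow edges (p ++ c :: fr')
              = (pvLevelB edges (p ++ c :: fr', []) (c :: fr')).1 :=
            pvGrow_eq edges p (c :: fr') hcl
          obtain ⟨d, hd⟩ := pvLevel_delta edges (c :: fr') (p ++ c :: fr') []
          have hd1 : (pvLevelB edges (p ++ c :: fr', []) (c :: fr')).1
              = (p ++ c :: fr') ++ d := by rw [hd]
          have hd2 : (pvLevelB edges (p ++ c :: fr', []) (c :: fr')).2 = d := by rw [hd]; rfl
          obtain ⟨hnd2, hsub2⟩ := pvLevel_inv edges (c :: fr') (p ++ c :: fr') [] hnd hsub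
          rw [hd1] at hnd2 hsub2
          have hgrow : pvGrow edges (p ++ c :: fr') = (p ++ c :: fr') ++ d := by
            rw [hg, hd1]
          have hlhs : pvLoopB edges (h + 1) (p ++ c :: fr') (c :: fr')
              = pvLoopB edges h ((p ++ c :: fr') ++ d) d := by
            show pvLoopB edges h (pvLevelB edges (p ++ c :: fr', []) (c :: fr')).1
              (pvLevelB edges (p ++ c :: fr', []) (c :: fr')).2 = _
            rw [hd1, hd2]
          have hdis : ∀ x ∈ d, x ∉ p ++ c :: fr' := by
            intro x hx hxs
            exact (List.nodup_append.mp hnd2).2.2 x hxs x hx rfl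
          cases d with
          | nil =>
              rw [hlhs, pvLoopB_nil]
              simp only [List.append_nil] at hgrow
              simp only [pvLoopBB, hgrow, pvEqual_refl, if_true, List.append_nil]
          | cons e d' =>
              have hle : ((p ++ c :: fr') ++ e :: d').length ≤ (pvU edges).length :=
                (hnd2.subperm hsub2).length_le
              have hcl' : ∀ x ∈ p ++ c :: fr', ∀ y ∈ pvParents edges x,
                  y ∈ (p ++ c :: fr') ++ e :: d' := by
                intro x hx y hy
                rcases List.mem_append.1 hx with hx | hx
                · exact List.mem_append_left _ (hcl x hx y hy)
                · have := pvLevel_closure edges (c :: fr') (p ++ c :: fr') [] x hx y hy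
                  rw [hd1] at this
                  exact this
              have heqf : PySem.Set.equal ((p ++ c :: fr') ++ e :: d') (p ++ c :: fr')
                  = false := pvEqual_false _ _ (by simp) hdis
              have hrhs : pvLoopBB edges (g + 1) (p ++ c :: fr')
                  = pvLoopBB edges g ((p ++ c :: fr') ++ e :: d') := by
                simp only [pvLoopBB, heqf, Bool.false_eq_true, if_false, hgrow]
              rw [hlhs, hrhs]
              refine ih h ((p ++ c :: fr') ++ e :: d') (p ++ c :: fr') (e :: d') rfl
                hcl' hnd2 hsub2 ?_
              intro _
              simp only [List.length_append, List.length_cons] at hle hfB hfg ⊢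
              omega

-- ===== VERDICT (by name: the statement is the Claim_ definition above) =====
theorem ancestor_subjects_py_spec : Claim_equal_ancestor_subjects_py := by
  intro subject edges _
  unfold Spec_ancestor_subjects_py ancestor_subjects_py ancestor_subjects_py_alt
  by_cases h : PySem.Dict.contains (PySem.Dict.mk edges) subject
  · simp only [h, if_true]
    have hU : (pvU edges).length = (edges.map (fun kv => kv.2.length)).sum := by
      simp [pvU, List.length_flatMap]
    have hsubU : PySem.Set.ofList (pvParents edges subject) ⊆ pvU edges := by
      intro x hx
      exact pvParents_subset edges subject ((PySem.Set.mem_ofList _ _).1 hx)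
    have hlen : (PySem.Set.ofList (pvParents edges subject)).length ≤ (pvU edges).length :=
      ((PySem.Set.nodup_ofList _).subperm hsubU).length_le
    have h1 : pvLoopA edges ((edges.map (fun kv => kv.2.length)).sum + 1)
          PySem.Set.empty [subject]
        = pvLoopB edges ((edges.map (fun kv => kv.2.length)).sum + 1)
          PySem.Set.empty [subject] := by
      apply pvMain
      · exact List.nodup_nil
      · intro x hx; cases hx
      · simp only [PySem.Set.empty, List.length_cons, List.length_nil]
        omega
      · simp only [PySem.Set.empty, List.length_cons, List.length_nil]
        omega
    have hfst : (pvLevelB edges (PySem.Set.empty, ([] : List String)) [subject]).1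
        = PySem.Set.ofList (pvParents edges subject) := by
      show ((pvParents edges subject).foldl pvAddParent ([], [])).1 = _
      rw [pvFold_fst]
      rfl
    have hsnd : (pvLevelB edges (PySem.Set.empty, ([] : List String)) [subject]).2
        = PySem.Set.ofList (pvParents edges subject) := by
      obtain ⟨d, hd⟩ := pvFold_delta (pvParents edges subject) [] []
      have h2 : pvLevelB edges (PySem.Set.empty, ([] : List String)) [subject]
          = (d, d) := by
        show (pvParents edges subject).foldl pvAddParent ([], []) = _
        simpa using hd
      have := hfst
      rw [h2] at this ⊢
      exact this
    have hstep : pvLoopB edges ((edges.map (fun kv => kv.2.length)).sum + 1)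
          PySem.Set.empty [subject]
        = pvLoopB edges ((edges.map (fun kv => kv.2.length)).sum)
          (PySem.Set.ofList (pvParents edges subject))
          (PySem.Set.ofList (pvParents edges subject)) := by
      show pvLoopB edges ((edges.map (fun kv => kv.2.length)).sum)
        (pvLevelB edges (PySem.Set.empty, []) [subject]).1
        (pvLevelB edges (PySem.Set.empty, []) [subject]).2 = _
      rw [hfst, hsnd]
    rw [h1, hstep]
    refine pvCorr edges ((edges.map (fun kv => kv.2.length)).sum + 1)
      ((edges.map (fun kv => kv.2.length)).sum)
      (PySem.Set.ofList (pvParents edges subject)) []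
      (PySem.Set.ofList (pvParents edges subject)) rfl
      (by intro x hx; cases hx) (PySem.Set.nodup_ofList _) hsubU ?_
    intro hne
    have hlen1 : 1 ≤ (PySem.Set.ofList (pvParents edges subject)).length := by
      cases hh : PySem.Set.ofList (pvParents edges subject) with
      | nil => exact absurd hh hne
      | cons a l => simp
    constructor <;> omega
  · simp [h]
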